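-- pv_equiv track=rewrite | github.com/Parth4950/An-AI-Driven-Multi-Agent-System-for-Co-operative-Analysis-and-Visualization-of-Clinical-Reports | src/extraction.py | _filter_abnormal_markers_lab_only
-- ===== SOURCE A (Python) =====
-- ABNORMAL_MARKER_MAX_LEN = 60
--
-- ABNORMAL_MARKER_BLOCKLIST = frozenset(
--     s.lower() for s in (
--         "tachy", "tachycardic", "brady", "pain", "sob", "dyspnea", "doe", "fatigue",
--         "wheezing", "cough", "nausea", "dizziness", "unremarkable", "non-contributory",
--         "denies", "impression", "diagnosis", "history", "normal", "elevated", "decreased",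
--     )
-- )
--
-- def _filter_abnormal_markers_lab_only(arr: list[str]) -> list[str]:
--     """LAB VALUES ONLY. Drop symptoms, vitals, narrative, long text, anything with spaces."""
--     out: list[str] = []
--     for s in arr:
--         s = str(s).strip()
--         if len(s) > ABNORMAL_MARKER_MAX_LEN or " " in s:
--             continue
--         low = s.lower()
--         if any(block in low for block in ABNORMAL_MARKER_BLOCKLIST):
--             continue
--         out.append(s)
--     return out
-- ===== SOURCE B (Python) =====
-- # First-character dispatch index: a dict built once maps each initial letter to the
-- # blocklist words starting with it; each candidate is scanned once and at position i
-- # only the words dispatched by low[i] are tested, so the scan over all 21 words per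
-- # candidate disappears.
-- _BLOCK_WORDS = (
--     "tachy", "tachycardic", "brady", "pain", "sob", "dyspnea", "doe", "fatigue",
--     "wheezing", "cough", "nausea", "dizziness", "unremarkable", "non-contributory",
--     "denies", "impression", "diagnosis", "history", "normal", "elevated", "decreased",
-- )
--
-- _DISPATCH: dict[str, list[str]] = {}
-- for _w in _BLOCK_WORDS:
--     _DISPATCH.setdefault(_w[0], []).append(_w)
--
-- def _blocked(low: str) -> bool:
--     for i, ch in enumerate(low):
--         for w in _DISPATCH.get(ch, ()):
--             if low.startswith(w, i):
--                 return True
--     return False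
--
-- def _filter_abnormal_markers_lab_only(arr: list[str]) -> list[str]:
--     return [t for t in (str(s).strip() for s in arr)
--             if len(t) <= 60 and " " not in t and not _blocked(t.lower())]
-- ===== Notes on version B (the rewrite author's own statement) =====
-- stated objective: alternative
-- what changed: Replaces the any-over-21-words substring scan by a first-character dispatch dict built once (initial letter -> words starting with it): each candidate is scanned once and at each position only the few words dispatched by that character are tested with startswith, so the inner scan over the whole blocklist disappears; the accumulator loop becomes a strip/filter comprehension pipeline.
import Mathlib
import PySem

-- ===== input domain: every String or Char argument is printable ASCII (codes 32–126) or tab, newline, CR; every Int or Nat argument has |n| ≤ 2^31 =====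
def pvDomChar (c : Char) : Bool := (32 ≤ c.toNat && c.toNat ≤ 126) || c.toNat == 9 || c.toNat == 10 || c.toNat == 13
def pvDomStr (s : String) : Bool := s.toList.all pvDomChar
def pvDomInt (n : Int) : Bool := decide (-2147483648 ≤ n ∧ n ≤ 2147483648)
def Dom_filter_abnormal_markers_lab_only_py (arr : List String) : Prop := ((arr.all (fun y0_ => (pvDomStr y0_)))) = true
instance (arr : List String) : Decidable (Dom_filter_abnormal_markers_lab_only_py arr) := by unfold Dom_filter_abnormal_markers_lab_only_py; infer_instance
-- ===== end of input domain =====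

-- B replaces the `any(block in low)` scan over all 21 blocklist words by a first-character
-- dispatch dict built once (initial letter → words starting with it): each candidate is
-- scanned once and at each position only the words dispatched by that character are tested;
-- objective: alternative matching data structure.

-- ===== PORT A =====
-- ABNORMAL_MARKER_BLOCKLIST (a frozenset used only through `any`, so iteration order is
-- irrelevant; ported as the distinct elements in source order, all already lowercase)
def pvBlocklistA : List String :=
  ["tachy", "tachycardic", "brady", "pain", "sob", "dyspnea", "doe", "fatigue",
   "wheezing", "cough", "nausea", "dizziness", "unremarkable", "non-contributory",
   "denies", "impression", "diagnosis", "history", "normal", "elevated", "decreased"]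

def filter_abnormal_markers_lab_only_py (arr : List String) : List String :=
  arr.foldl (fun out s0 =>
    let s := PySem.Str.strip s0
    if decide (60 < PySem.Str.len s) || PySem.Str.isIn " " s then out
    else
      let low := PySem.Str.lower s
      if pvBlocklistA.any (fun block => PySem.Str.isIn block low) then out
      else out ++ [s]) []

-- ===== PORT B =====
-- _DISPATCH as Source B builds it at import time (setdefault/append over _BLOCK_WORDS:
-- keys in order of first occurrence of each initial letter, values in source order)
def pvDispatch : PySem.Dict Char (List String) := PySem.Dict.mk
  [('t', ["tachy", "tachycardic"]),
   ('b', ["brady"]),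
   ('p', ["pain"]),
   ('s', ["sob"]),
   ('d', ["dyspnea", "doe", "dizziness", "denies", "diagnosis", "decreased"]),
   ('f', ["fatigue"]),
   ('w', ["wheezing"]),
   ('c', ["cough"]),
   ('n', ["nausea", "non-contributory", "normal"]),
   ('u', ["unremarkable"]),
   ('i', ["impression"]),
   ('h', ["history"]),
   ('e', ["elevated"])]

-- low.startswith(w, i) with 0 ≤ i is exactly startswith on the drop-i tail
def pvBlocked (low : String) : Bool :=
  (PySem.List.enumerate low.toList).any (fun p =>
    (pvDispatch.getD p.2 []).any (fun w =>
      PySem.Chars.startswith (low.toList.drop p.1.toNat) w.toList))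

def filter_abnormal_markers_lab_only_py_alt (arr : List String) : List String :=
  (arr.map PySem.Str.strip).filter (fun t =>
    PySem.Str.len t ≤ 60 && !(PySem.Str.isIn " " t) && !(pvBlocked (PySem.Str.lower t)))

-- ===== PRECONDITION & SPEC =====
def Spec_filter_abnormal_markers_lab_only_py (arr : List String) (out : List String) : Prop := out = filter_abnormal_markers_lab_only_py_alt arr
instance (arr : List String) (out : List String) : Decidable (Spec_filter_abnormal_markers_lab_only_py arr out) := by unfold Spec_filter_abnormal_markers_lab_only_py; infer_instance

-- ===== CLAIM (what is proved, stated in full; the proofs are below) =====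
def Claim_equal_filter_abnormal_markers_lab_only_py : Prop := ∀ (arr : List String), Dom_filter_abnormal_markers_lab_only_py arr → Spec_filter_abnormal_markers_lab_only_py arr (filter_abnormal_markers_lab_only_py arr)

-- ===== LEMMAS AND PROOFS =====

-- every word stored in the dispatch dict is a blocklist word
set_option maxRecDepth 2000 in
lemma pvDispatch_sub : ∀ p ∈ pvDispatch.items, ∀ w ∈ p.2, w ∈ pvBlocklistA := by decide

-- every blocklist word is nonempty and is stored under its first character
set_option maxRecDepth 2000 in
lemma pvDispatch_cov :
    ∀ b ∈ pvBlocklistA, b.toList ≠ [] ∧ b ∈ pvDispatch.getD b.toList.headI [] := by decide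

lemma pvDispatch_getD_mem {c : Char} {w : String} (hw : w ∈ pvDispatch.getD c []) :
    w ∈ pvBlocklistA := by
  rw [PySem.Dict.getD_eq_get?_getD] at hw
  cases hget : pvDispatch.get? c with
  | none => rw [hget] at hw; simp at hw
  | some v =>
    rw [hget] at hw
    exact pvDispatch_sub (c, v) (PySem.Dict.mem_items_of_get?_eq_some pvDispatch hget) w hw

lemma pvBlocked_eq (low : String) :
    pvBlocked low = pvBlocklistA.any (fun block => PySem.Str.isIn block low) := by
  rw [Bool.eq_iff_iff]
  simp only [pvBlocked, List.any_eq_true, PySem.Chars.startswith_iff,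
    PySem.Str.isIn_iff_infix, PySem.List.mem_enumerate_iff]
  constructor
  · rintro ⟨p, ⟨k, hk, rfl⟩, w, hw, hpre⟩
    exact ⟨w, pvDispatch_getD_mem hw,
      hpre.isInfix.trans (List.drop_suffix _ low.toList).isInfix⟩
  · rintro ⟨b, hb, hinf⟩
    obtain ⟨hne, hmem⟩ := pvDispatch_cov b hb
    obtain ⟨h, t, hbt⟩ := List.exists_cons_of_ne_nil hne
    have hmem' : b ∈ pvDispatch.getD h [] := by rw [hbt] at hmem; simpa using hmem
    obtain ⟨j, hj⟩ := (PySem.Chars.exists_prefix_drop_iff_isIn _ _).mpr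
      ((PySem.Chars.isIn_iff_infix _ _).mpr hinf)
    have hjlt : j < low.toList.length := by
      by_contra hge
      have : low.toList.drop j = [] := List.drop_eq_nil_of_le (by omega)
      rw [this, hbt] at hj
      simpa using List.prefix_nil.mp hj
    have hdrop : low.toList.drop j = low.toList[j] :: low.toList.drop (j + 1) :=
      List.drop_eq_getElem_cons hjlt
    have hch : low.toList[j] = h := by
      rw [hdrop, hbt] at hj
      obtain ⟨h1, -⟩ := List.cons_prefix_cons.mp hj
      exact h1.symm
    refine ⟨((j : Int), low.toList[j]), ⟨j, hjlt, by simp⟩, b, ?_, ?_⟩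
    · show b ∈ pvDispatch.getD low.toList[j] []
      rw [hch]; exact hmem'
    · show b.toList <+: low.toList.drop ((j : Int)).toNat
      simpa using hj
  
-- A's loop shape: accumulate-or-skip over f-transformed elements is a map/filter
lemma pv_foldl_shape (f : String → String) (g h : String → Bool)
    (arr acc : List String) :
    arr.foldl (fun out s0 =>
      let s := f s0
      if g s then out
      else if h s then out
      else out ++ [s]) acc
    = acc ++ (arr.map f).filter (fun t => !g t && !h t) := by
  induction arr generalizing acc with
  | nil => simp
  | cons s0 rest ih =>
    simp only [List.foldl_cons, List.map_cons, List.filter_cons]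
    cases hg : g (f s0) <;> cases hh : h (f s0) <;>
      simp [ih]

lemma pv_pred_eq (t : String) :
    (PySem.Str.len t ≤ 60 && !(PySem.Str.isIn " " t) && !(pvBlocked (PySem.Str.lower t)))
    = (!(decide (60 < PySem.Str.len t) || PySem.Str.isIn " " t)
        && !(pvBlocklistA.any (fun block => PySem.Str.isIn block (PySem.Str.lower t)))) := by
  rw [← pvBlocked_eq]
  cases h1 : decide (60 < PySem.Str.len t) <;> cases h2 : PySem.Str.isIn " " t <;>
    cases h3 : pvBlocked (PySem.Str.lower t)
  all_goals simp only [Bool.not_true, Bool.not_false, Bool.or_true,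
    Bool.or_false, Bool.and_true, Bool.and_false]
  all_goals simp only [decide_eq_true_eq, decide_eq_false_iff_not, not_lt] at h1
  all_goals first
  | rfl
  | rw [decide_eq_false (by omega : ¬ PySem.Str.len t ≤ 60)]
  | rw [decide_eq_true (by omega : PySem.Str.len t ≤ 60)]

-- ===== VERDICT (by name: the statement is the Claim_ definition above) =====
theorem filter_abnormal_markers_lab_only_py_spec : Claim_equal_filter_abnormal_markers_lab_only_py := by
  intro arr _
  unfold Spec_filter_abnormal_markers_lab_only_py
  have h2 : filter_abnormal_markers_lab_only_py arr
      = (arr.map PySem.Str.strip).filter (fun t =>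
          !(decide (60 < PySem.Str.len t) || PySem.Str.isIn " " t)
          && !(pvBlocklistA.any (fun block => PySem.Str.isIn block (PySem.Str.lower t)))) := by
    unfold filter_abnormal_markers_lab_only_py
    exact (pv_foldl_shape PySem.Str.strip
      (fun t => decide (60 < PySem.Str.len t) || PySem.Str.isIn " " t)
      (fun t => pvBlocklistA.any (fun block => PySem.Str.isIn block (PySem.Str.lower t)))
      arr []).trans (List.nil_append _)
  rw [h2]
  unfold filter_abnormal_markers_lab_only_py_alt
  exact (List.filter_congr (fun t _ => pv_pred_eq t)).symm
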